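-- pv_equiv track=rewrite | github.com/sunsetsobserver/chain-of-thoughts | chain_of_thoughts_3.py | nearest_scale_pitch
-- ===== SOURCE A (Python) =====
-- from typing import Dict, List, Tuple
--
-- def nearest_scale_pitch(p: int, tonic: int, scale: List[int]) -> int:
--     """Return the nearest pitch to p that lies on the infinite lattice of tonic+scale."""
--     best, best_dist = p, 999
--     tonic_pc = tonic % 12
--     pcs = [(tonic_pc + s) % 12 for s in scale]
--     base_oct = p - (p % 12)
--     # search a few neighboring octaves
--     for oct_shift in (-24, -12, 0, 12, 24, 36, -36):
--         for pc in pcs: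
--             cand = base_oct + pc + oct_shift
--             d = abs(cand - p)
--             if d < best_dist:
--                 best, best_dist = cand, d
--     return best
-- ===== SOURCE B (Python) =====
-- def nearest_scale_pitch(p: int, tonic: int, scale):
--     """Nearest lattice pitch to p, computed in closed form per scale degree (no octave scan)."""
--     pm = p % 12
--     best = None  # (key, candidate)
--     for s in scale:
--         q = (tonic + s) % 12 - pm          # pitch-class offset from p, in [-11, 11]
--         r = (q + 6) % 12 - 6               # nearest offset in [-6, 5]; distance-6 ties go low
--         key = (abs(r), r - q)              # distance, then the octave shift used (lower first)
--         if best is None or key < best[0]: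
--             best = (key, p + r)
--     return p if best is None else best[1]
-- ===== Notes on version B (the rewrite author's own statement) =====
-- stated objective: faster
-- what changed: Replaces A's scan of 7 octave shifts per pitch-class by a single pass that computes each pitch-class's nearest candidate in closed form ((pc-offset+6)%12-6) and keeps the first minimum under a (distance, octave-shift) key that reproduces A's tie order.
import Mathlib
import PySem

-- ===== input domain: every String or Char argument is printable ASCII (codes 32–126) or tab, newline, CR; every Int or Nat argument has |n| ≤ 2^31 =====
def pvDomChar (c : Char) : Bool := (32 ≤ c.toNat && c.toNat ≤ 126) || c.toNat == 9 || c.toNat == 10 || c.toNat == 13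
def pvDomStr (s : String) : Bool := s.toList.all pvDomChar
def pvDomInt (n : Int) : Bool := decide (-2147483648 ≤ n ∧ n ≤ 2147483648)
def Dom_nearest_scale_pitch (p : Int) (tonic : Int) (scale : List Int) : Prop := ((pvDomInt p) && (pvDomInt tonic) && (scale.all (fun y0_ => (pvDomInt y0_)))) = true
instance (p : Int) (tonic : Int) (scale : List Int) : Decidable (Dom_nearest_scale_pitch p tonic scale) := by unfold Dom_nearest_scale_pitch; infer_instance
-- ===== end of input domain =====

-- B replaces A's 7-octave candidate scan by one closed-form candidate per scale degree,
-- with a (distance, octave-shift) key that reproduces A's tie order exactly.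

-- ===== PORT A =====
def nearest_scale_pitch (p : Int) (tonic : Int) (scale : List Int) : Int :=
  let tonic_pc := PySem.Int.mod tonic 12
  let pcs := scale.map (fun s => PySem.Int.mod (tonic_pc + s) 12)
  let base_oct := p - PySem.Int.mod p 12
  let st := ([(-24 : Int), -12, 0, 12, 24, 36, -36]).foldl
    (fun st oct_shift =>
      pcs.foldl (fun st pc =>
        let cand := base_oct + pc + oct_shift
        let d := |cand - p|
        if d < st.2 then (cand, d) else st) st)
    (p, 999)
  st.1

-- ===== PORT B =====
def nearest_scale_pitch_alt (p : Int) (tonic : Int) (scale : List Int) : Int :=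
  let pm := PySem.Int.mod p 12
  let best := scale.foldl
    (fun best s =>
      let q := PySem.Int.mod (tonic + s) 12 - pm
      let r := PySem.Int.mod (q + 6) 12 - 6
      let key : Int × Int := (|r|, r - q)
      match best with
      | none => some (key, p + r)
      -- Python tuple '<' ported as explicit lexicographic comparison (exact)
      | some b => if key.1 < b.1.1 ∨ (key.1 = b.1.1 ∧ key.2 < b.1.2) then some (key, p + r) else best)
    none
  match best with
  | none => p
  | some b => b.2

-- ===== PRECONDITION & SPEC =====
def Spec_nearest_scale_pitch (p : Int) (tonic : Int) (scale : List Int) (out : Int) : Prop := out = nearest_scale_pitch_alt p tonic scale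
instance (p : Int) (tonic : Int) (scale : List Int) (out : Int) : Decidable (Spec_nearest_scale_pitch p tonic scale out) := by unfold Spec_nearest_scale_pitch; infer_instance

-- ===== CLAIM (what is proved, stated in full; the proofs are below) =====
def Claim_equal_nearest_scale_pitch : Prop := ∀ (p : Int) (tonic : Int) (scale : List Int), Dom_nearest_scale_pitch p tonic scale → Spec_nearest_scale_pitch p tonic scale (nearest_scale_pitch p tonic scale)

-- ===== LEMMAS AND PROOFS =====

lemma pvmod (a : Int) : PySem.Int.mod a 12 = a % 12 := PySem.Int.mod_eq_emod_of_pos (by norm_num)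

-- per-degree data of B: offset q, nearest offset r, key (|r|, r - q)
def pvQ (p tonic s : Int) : Int := PySem.Int.mod (tonic + s) 12 - PySem.Int.mod p 12
def pvR (p tonic s : Int) : Int := PySem.Int.mod (pvQ p tonic s + 6) 12 - 6
def pvKey (p tonic s : Int) : Int × Int := (|pvR p tonic s|, pvR p tonic s - pvQ p tonic s)

-- strict / non-strict lexicographic order on keys (Python tuple comparison)
def pvKlt (a b : Int × Int) : Prop := a.1 < b.1 ∨ (a.1 = b.1 ∧ a.2 < b.2)
def pvKle (a b : Int × Int) : Prop := a.1 < b.1 ∨ (a.1 = b.1 ∧ a.2 ≤ b.2)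

-- generic A-side fold (keep-first-strict-improvement by distance)
def pvRun (p : Int) (s : Int × Int) (cs : List Int) : Int × Int :=
  cs.foldl (fun st c => if |c - p| < st.2 then (c, |c - p|) else st) s

-- generic B-side fold (B's loop body over an arbitrary start state)
def pvBRun (p tonic : Int) (st : Option ((Int × Int) × Int)) (l : List Int) : Option ((Int × Int) × Int) :=
  l.foldl
    (fun best s =>
      let q := PySem.Int.mod (tonic + s) 12 - PySem.Int.mod p 12
      let r := PySem.Int.mod (q + 6) 12 - 6
      let key : Int × Int := (|r|, r - q)
      match best with
      | none => some (key, p + r)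
      | some b => if key.1 < b.1.1 ∨ (key.1 = b.1.1 ∧ key.2 < b.1.2) then some (key, p + r) else best)
    st

lemma pvRun_noupdate (p : Int) (s : Int × Int) (cs : List Int)
    (h : ∀ c ∈ cs, s.2 ≤ |c - p|) : pvRun p s cs = s := by
  induction cs with
  | nil => rfl
  | cons c cs ih =>
      have hc := h c (by simp)
      simp only [pvRun, List.foldl_cons]
      rw [if_neg (by omega)]
      exact ih (fun x hx => h x (by simp [hx]))

lemma pvRun_first (p : Int) (c : Int) (cs2 : List Int) :
    ∀ (cs1 : List Int) (s : Int × Int), |c - p| < s.2 →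
    (∀ x ∈ cs1, |c - p| < |x - p|) → (∀ x ∈ cs2, |c - p| ≤ |x - p|) →
    pvRun p s (cs1 ++ c :: cs2) = (c, |c - p|) := by
  intro cs1
  induction cs1 with
  | nil =>
      intro s hs _ h2
      simp only [List.nil_append, pvRun, List.foldl_cons]
      rw [if_pos hs]
      exact pvRun_noupdate p _ cs2 (by simpa using h2)
  | cons x cs1 ih =>
      intro s hs h1 h2
      have hx := h1 x (by simp)
      simp only [List.cons_append, pvRun, List.foldl_cons] at *
      by_cases hcase : |x - p| < s.2
      · rw [if_pos hcase]
        exact ih (x, |x - p|) (by simpa using hx) (fun y hy => h1 y (by simp [hy])) h2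
      · rw [if_neg hcase]
        exact ih s hs (fun y hy => h1 y (by simp [hy])) h2

lemma pvBRun_keep (p tonic : Int) (k : Int × Int) (v : Int) :
    ∀ (l : List Int), (∀ x ∈ l, pvKle k (pvKey p tonic x)) →
    pvBRun p tonic (some (k, v)) l = some (k, v) := by
  intro l
  induction l with
  | nil => intro _; rfl
  | cons x l ih =>
      intro h
      have hx := h x (by simp)
      simp only [pvBRun, List.foldl_cons]
      rw [if_neg (by simp only [pvKle, pvKey, pvR, pvQ] at hx ⊢; omega)]
      exact ih (fun y hy => h y (by simp [hy]))

lemma pvBRun_some_first (p tonic : Int) (s0 : Int) (l2 : List Int)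
    (h2 : ∀ x ∈ l2, pvKle (pvKey p tonic s0) (pvKey p tonic x)) :
    ∀ (l1 : List Int) (k : Int × Int) (v : Int), pvKlt (pvKey p tonic s0) k →
    (∀ x ∈ l1, pvKlt (pvKey p tonic s0) (pvKey p tonic x)) →
    pvBRun p tonic (some (k, v)) (l1 ++ s0 :: l2) = some (pvKey p tonic s0, p + pvR p tonic s0) := by
  intro l1
  induction l1 with
  | nil =>
      intro k v hk _
      simp only [List.nil_append, pvBRun, List.foldl_cons]
      rw [if_pos (by simp only [pvKlt, pvKey, pvR, pvQ] at hk ⊢; omega)]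
      exact pvBRun_keep p tonic _ _ l2 h2
  | cons x l1 ih =>
      intro k v hk h1
      have hx := h1 x (by simp)
      simp only [List.cons_append, pvBRun, List.foldl_cons]
      by_cases hcase : (|PySem.Int.mod (PySem.Int.mod (tonic + x) 12 - PySem.Int.mod p 12 + 6) 12 - 6| < k.1 ∨
          (|PySem.Int.mod (PySem.Int.mod (tonic + x) 12 - PySem.Int.mod p 12 + 6) 12 - 6| = k.1 ∧
            PySem.Int.mod (PySem.Int.mod (tonic + x) 12 - PySem.Int.mod p 12 + 6) 12 - 6 -
              (PySem.Int.mod (tonic + x) 12 - PySem.Int.mod p 12) < k.2))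
      · rw [if_pos hcase]
        exact ih _ _ hx (fun y hy => h1 y (by simp [hy]))
      · rw [if_neg hcase]
        exact ih _ _ hk (fun y hy => h1 y (by simp [hy]))

lemma pvBRun_first (p tonic : Int) (l1 : List Int) (s0 : Int) (l2 : List Int)
    (h1 : ∀ x ∈ l1, pvKlt (pvKey p tonic s0) (pvKey p tonic x))
    (h2 : ∀ x ∈ l2, pvKle (pvKey p tonic s0) (pvKey p tonic x)) :
    pvBRun p tonic none (l1 ++ s0 :: l2) = some (pvKey p tonic s0, p + pvR p tonic s0) := by
  cases l1 with
  | nil =>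
      simp only [List.nil_append, pvBRun, List.foldl_cons]
      exact pvBRun_keep p tonic _ _ l2 h2
  | cons x l1 =>
      have hx := h1 x (by simp)
      simp only [List.cons_append, pvBRun, List.foldl_cons]
      exact pvBRun_some_first p tonic s0 l2 h2 l1 _ _ hx (fun y hy => h1 y (by simp [hy]))

-- every nonempty list has a first lexicographic minimum
lemma pvExists_first (p tonic : Int) :
    ∀ (l : List Int), l ≠ [] → ∃ l1 s0 l2, l = l1 ++ s0 :: l2 ∧
      (∀ x ∈ l1, pvKlt (pvKey p tonic s0) (pvKey p tonic x)) ∧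
      (∀ x ∈ l2, pvKle (pvKey p tonic s0) (pvKey p tonic x)) := by
  intro l
  induction l with
  | nil => intro h; exact absurd rfl h
  | cons x l ih =>
      intro _
      cases l with
      | nil => exact ⟨[], x, [], by simp, by simp, by simp⟩
      | cons y t =>
          obtain ⟨l1, s0, l2, heq, h1, h2⟩ := ih (by simp)
          by_cases hx : pvKle (pvKey p tonic x) (pvKey p tonic s0)
          · refine ⟨[], x, y :: t, by simp, by simp, ?_⟩
            intro z hz
            rw [heq] at hz
            rcases List.mem_append.mp hz with hz1 | hz2
            · have := h1 z hz1
              simp only [pvKle, pvKlt] at *; omega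
            · rcases List.mem_cons.mp hz2 with rfl | hz3
              · exact hx
              · have := h2 z hz3
                simp only [pvKle, pvKlt] at *; omega
          · refine ⟨x :: l1, s0, l2, by rw [heq]; rfl, ?_, h2⟩
            intro z hz
            rcases List.mem_cons.mp hz with rfl | hz1
            · simp only [pvKle, pvKlt] at *; omega
            · exact h1 z hz1

-- A as a single run over the flattened shift-major candidate list
def pvCand (p tonic sh s : Int) : Int :=
  (p - PySem.Int.mod p 12) + PySem.Int.mod (PySem.Int.mod tonic 12 + s) 12 + sh

def pvL (p tonic : Int) (scale : List Int) : List Int :=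
  ([(-24 : Int), -12, 0, 12, 24, 36, -36]).flatMap (fun sh => scale.map (pvCand p tonic sh))

lemma pvA_eq_run (p tonic : Int) (scale : List Int) :
    nearest_scale_pitch p tonic scale = (pvRun p (p, 999) (pvL p tonic scale)).1 := by
  simp [nearest_scale_pitch, pvRun, pvL, pvCand, List.flatMap, List.foldl_append, List.foldl_map]

lemma pvAlt_eq_brun (p tonic : Int) (scale : List Int) :
    nearest_scale_pitch_alt p tonic scale =
      (match pvBRun p tonic none scale with
       | none => p
       | some b => b.2) := rfl

lemma pvCand_sub (p tonic sh s : Int) : pvCand p tonic sh s - p = pvQ p tonic s + sh := by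
  simp only [pvCand, pvQ, pvmod]
  omega

lemma pvQ_bounds (p tonic s : Int) : -11 ≤ pvQ p tonic s ∧ pvQ p tonic s ≤ 11 := by
  simp only [pvQ, pvmod]; omega

lemma pvR_spec (p tonic s : Int) :
    -6 ≤ pvR p tonic s ∧ pvR p tonic s ≤ 5 ∧
    (pvR p tonic s - pvQ p tonic s = -12 ∨ pvR p tonic s - pvQ p tonic s = 0 ∨
      pvR p tonic s - pvQ p tonic s = 12) := by
  simp only [pvR, pvQ, pvmod]
  omega

-- arithmetic cores: q0+sh0 (= r0) is A's winning offset, q+sh any other candidate's offset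
lemma pv_le (r0 q0 r q sh0 sh : Int)
    (h0 : -6 ≤ r0 ∧ r0 ≤ 5 ∧ (r0 - q0 = -12 ∨ r0 - q0 = 0 ∨ r0 - q0 = 12))
    (hq0 : -11 ≤ q0 ∧ q0 ≤ 11)
    (hr : -6 ≤ r ∧ r ≤ 5 ∧ (r - q = -12 ∨ r - q = 0 ∨ r - q = 12))
    (hq : -11 ≤ q ∧ q ≤ 11)
    (hsh0 : sh0 = r0 - q0)
    (hsh : sh = -24 ∨ sh = -12 ∨ sh = 0 ∨ sh = 12 ∨ sh = 24 ∨ sh = 36 ∨ sh = -36)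
    (hlex : |r0| < |r| ∨ (|r0| = |r| ∧ r0 - q0 ≤ r - q)) :
    |q0 + sh0| ≤ |q + sh| := by
  simp only [Int.abs_eq_natAbs] at hlex ⊢
  omega

lemma pv_lt_before (r0 q0 r q sh0 sh : Int)
    (h0 : -6 ≤ r0 ∧ r0 ≤ 5 ∧ (r0 - q0 = -12 ∨ r0 - q0 = 0 ∨ r0 - q0 = 12))
    (hq0 : -11 ≤ q0 ∧ q0 ≤ 11)
    (hr : -6 ≤ r ∧ r ≤ 5 ∧ (r - q = -12 ∨ r - q = 0 ∨ r - q = 12))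
    (hq : -11 ≤ q ∧ q ≤ 11)
    (hsh0 : sh0 = r0 - q0)
    (hsh : sh = -24 ∨ sh = -12 ∨ sh = 0 ∨ sh = 12)
    (hlt : sh < sh0)
    (hlex : |r0| < |r| ∨ (|r0| = |r| ∧ r0 - q0 ≤ r - q)) :
    |q0 + sh0| < |q + sh| := by
  simp only [Int.abs_eq_natAbs] at hlex ⊢
  omega

lemma pv_lt_at (r0 q0 r q sh0 sh : Int)
    (h0 : -6 ≤ r0 ∧ r0 ≤ 5 ∧ (r0 - q0 = -12 ∨ r0 - q0 = 0 ∨ r0 - q0 = 12))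
    (hq0 : -11 ≤ q0 ∧ q0 ≤ 11)
    (hr : -6 ≤ r ∧ r ≤ 5 ∧ (r - q = -12 ∨ r - q = 0 ∨ r - q = 12))
    (hq : -11 ≤ q ∧ q ≤ 11)
    (hsh0 : sh0 = r0 - q0)
    (hsh : sh = sh0)
    (hlex : |r0| < |r| ∨ (|r0| = |r| ∧ r0 - q0 < r - q)) :
    |q0 + sh0| < |q + sh| := by
  simp only [Int.abs_eq_natAbs] at hlex ⊢
  omega

-- one case of the main argument: the shift list splits as S1 ++ (r0-q0) :: S2
lemma pv_case (p tonic : Int) (l1 : List Int) (s0 : Int) (l2 : List Int) (S1 S2 : List Int)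
    (hS : ([(-24 : Int), -12, 0, 12, 24, 36, -36]) =
      S1 ++ (pvR p tonic s0 - pvQ p tonic s0) :: S2)
    (hS1 : ∀ sh ∈ S1, (sh = -24 ∨ sh = -12 ∨ sh = 0 ∨ sh = 12) ∧
      sh < pvR p tonic s0 - pvQ p tonic s0)
    (hS2 : ∀ sh ∈ S2, sh = -24 ∨ sh = -12 ∨ sh = 0 ∨ sh = 12 ∨ sh = 24 ∨ sh = 36 ∨ sh = -36)
    (hklt1 : ∀ y ∈ l1, |pvR p tonic s0| < |pvR p tonic y| ∨
      (|pvR p tonic s0| = |pvR p tonic y| ∧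
        pvR p tonic s0 - pvQ p tonic s0 < pvR p tonic y - pvQ p tonic y))
    (hkle2 : ∀ y ∈ l2, |pvR p tonic s0| < |pvR p tonic y| ∨
      (|pvR p tonic s0| = |pvR p tonic y| ∧
        pvR p tonic s0 - pvQ p tonic s0 ≤ pvR p tonic y - pvQ p tonic y)) :
    (pvRun p (p, 999) (pvL p tonic (l1 ++ s0 :: l2))).1 = p + pvR p tonic s0 := by
  have h0 := pvR_spec p tonic s0
  have hq0 := pvQ_bounds p tonic s0
  have hkleAll : ∀ y ∈ l1 ++ s0 :: l2, |pvR p tonic s0| < |pvR p tonic y| ∨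
      (|pvR p tonic s0| = |pvR p tonic y| ∧
        pvR p tonic s0 - pvQ p tonic s0 ≤ pvR p tonic y - pvQ p tonic y) := by
    intro y hy
    rcases List.mem_append.mp hy with h | h
    · rcases hklt1 y h with h' | ⟨h', h''⟩
      · exact Or.inl h'
      · exact Or.inr ⟨h', le_of_lt h''⟩
    · rcases List.mem_cons.mp h with rfl | h
      · exact Or.inr ⟨rfl, le_refl _⟩
      · exact hkle2 y h
  have hsplit : pvL p tonic (l1 ++ s0 :: l2) =
      (S1.flatMap (fun sh => (l1 ++ s0 :: l2).map (pvCand p tonic sh)) ++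
        l1.map (pvCand p tonic (pvR p tonic s0 - pvQ p tonic s0))) ++
      pvCand p tonic (pvR p tonic s0 - pvQ p tonic s0) s0 ::
      (l2.map (pvCand p tonic (pvR p tonic s0 - pvQ p tonic s0)) ++
        S2.flatMap (fun sh => (l1 ++ s0 :: l2).map (pvCand p tonic sh))) := by
    rw [pvL, hS]
    simp [List.flatMap_append, List.flatMap_cons, List.map_append, List.map_cons,
      List.append_assoc]
  have h999 : |pvCand p tonic (pvR p tonic s0 - pvQ p tonic s0) s0 - p| < ((p, (999 : Int))).2 := by
    show |pvCand p tonic (pvR p tonic s0 - pvQ p tonic s0) s0 - p| < 999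
    have := pvCand_sub p tonic (pvR p tonic s0 - pvQ p tonic s0) s0
    simp only [Int.abs_eq_natAbs]; omega
  have hb : ∀ x ∈ (S1.flatMap (fun sh => (l1 ++ s0 :: l2).map (pvCand p tonic sh)) ++
        l1.map (pvCand p tonic (pvR p tonic s0 - pvQ p tonic s0))),
      |pvCand p tonic (pvR p tonic s0 - pvQ p tonic s0) s0 - p| < |x - p| := by
    intro x hx
    rcases List.mem_append.mp hx with hx | hx
    · rcases List.mem_flatMap.mp hx with ⟨sh, hsh, hx⟩
      rcases List.mem_map.mp hx with ⟨y, hy, rfl⟩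
      simp only [pvCand_sub]
      exact pv_lt_before _ _ _ _ _ _ h0 hq0 (pvR_spec p tonic y) (pvQ_bounds p tonic y)
        rfl (hS1 sh hsh).1 (hS1 sh hsh).2 (hkleAll y hy)
    · rcases List.mem_map.mp hx with ⟨y, hy, rfl⟩
      simp only [pvCand_sub]
      exact pv_lt_at _ _ _ _ _ _ h0 hq0 (pvR_spec p tonic y) (pvQ_bounds p tonic y)
        rfl rfl (hklt1 y hy)
  have ha : ∀ x ∈ (l2.map (pvCand p tonic (pvR p tonic s0 - pvQ p tonic s0)) ++
        S2.flatMap (fun sh => (l1 ++ s0 :: l2).map (pvCand p tonic sh))),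
      |pvCand p tonic (pvR p tonic s0 - pvQ p tonic s0) s0 - p| ≤ |x - p| := by
    intro x hx
    rcases List.mem_append.mp hx with hx | hx
    · rcases List.mem_map.mp hx with ⟨y, hy, rfl⟩
      simp only [pvCand_sub]
      exact pv_le _ _ _ _ _ _ h0 hq0 (pvR_spec p tonic y) (pvQ_bounds p tonic y)
        rfl (by omega) (hkle2 y hy)
    · rcases List.mem_flatMap.mp hx with ⟨sh, hsh, hx⟩
      rcases List.mem_map.mp hx with ⟨y, hy, rfl⟩
      simp only [pvCand_sub]
      exact pv_le _ _ _ _ _ _ h0 hq0 (pvR_spec p tonic y) (pvQ_bounds p tonic y)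
        rfl (hS2 sh hsh) (hkleAll y hy)
  rw [hsplit, pvRun_first p _ _ _ _ h999 hb ha]
  show pvCand p tonic (pvR p tonic s0 - pvQ p tonic s0) s0 = p + pvR p tonic s0
  have := pvCand_sub p tonic (pvR p tonic s0 - pvQ p tonic s0) s0
  omega

theorem pv_main (p tonic : Int) (scale : List Int) :
    nearest_scale_pitch p tonic scale = nearest_scale_pitch_alt p tonic scale := by
  by_cases hne : scale = []
  · subst hne; rfl
  obtain ⟨l1, s0, l2, heq, h1, h2⟩ := pvExists_first p tonic scale hne
  subst heq
  have hB : nearest_scale_pitch_alt p tonic (l1 ++ s0 :: l2) = p + pvR p tonic s0 := by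
    rw [pvAlt_eq_brun, pvBRun_first p tonic l1 s0 l2 h1 h2]
  rw [hB, pvA_eq_run]
  have hklt1 : ∀ y ∈ l1, |pvR p tonic s0| < |pvR p tonic y| ∨
      (|pvR p tonic s0| = |pvR p tonic y| ∧
        pvR p tonic s0 - pvQ p tonic s0 < pvR p tonic y - pvQ p tonic y) := by
    intro y hy; have := h1 y hy; simpa [pvKlt, pvKey] using this
  have hkle2 : ∀ y ∈ l2, |pvR p tonic s0| < |pvR p tonic y| ∨
      (|pvR p tonic s0| = |pvR p tonic y| ∧
        pvR p tonic s0 - pvQ p tonic s0 ≤ pvR p tonic y - pvQ p tonic y) := by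
    intro y hy; have := h2 y hy; simpa [pvKle, pvKey] using this
  rcases (pvR_spec p tonic s0).2.2 with hrs | hrs | hrs
  · exact pv_case p tonic l1 s0 l2 [-24] [0, 12, 24, 36, -36]
      (by rw [hrs]; rfl)
      (by intro sh h; simp at h; subst h; exact ⟨Or.inl rfl, by omega⟩)
      (by intro sh h; simp at h; rcases h with rfl | rfl | rfl | rfl | rfl <;> simp)
      hklt1 hkle2
  · exact pv_case p tonic l1 s0 l2 [-24, -12] [12, 24, 36, -36]
      (by rw [hrs]; rfl)
      (by intro sh h; simp at h; rcases h with rfl | rfl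
          · exact ⟨Or.inl rfl, by omega⟩
          · exact ⟨Or.inr (Or.inl rfl), by omega⟩)
      (by intro sh h; simp at h; rcases h with rfl | rfl | rfl | rfl <;> simp)
      hklt1 hkle2
  · exact pv_case p tonic l1 s0 l2 [-24, -12, 0] [24, 36, -36]
      (by rw [hrs]; rfl)
      (by intro sh h; simp at h; rcases h with rfl | rfl | rfl
          · exact ⟨Or.inl rfl, by omega⟩
          · exact ⟨Or.inr (Or.inl rfl), by omega⟩
          · exact ⟨Or.inr (Or.inr (Or.inl rfl)), by omega⟩)
      (by intro sh h; simp at h; rcases h with rfl | rfl | rfl <;> simp)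
      hklt1 hkle2

-- ===== VERDICT (by name: the statement is the Claim_ definition above) =====
theorem nearest_scale_pitch_spec : Claim_equal_nearest_scale_pitch := by
  intro p tonic scale _
  unfold Spec_nearest_scale_pitch
  exact pv_main p tonic scale
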